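-- pv_equiv track=rewrite | github.com/varung-31/Artificial-Intelligence | BayesianNetwork/network.py | add_missing_parents
-- ===== SOURCE A (Python) =====
-- from copy import deepcopy
--
-- def get_all_combinations(missing_parents, index, combination):
--     if index == len(missing_parents):
--         return
--     temp = deepcopy(missing_parents)
--     temp[index] = '~' + temp[index]
--     combination.append(temp)
--     get_all_combinations(temp, index + 1, combination)
--
--     temp = deepcopy(missing_parents)
--     get_all_combinations(temp, index + 1, combination)
--
-- def add_missing_parents(expression, missing_parents):
--     expression_list = []
--     combination = [missing_parents]
--     get_all_combinations(missing_parents, 0, combination)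
--     for term in combination:
--         t = deepcopy(expression)
--         t.extend(term)
--         expression_list.append(t)
--     return expression_list
-- ===== SOURCE B (Python) =====
-- def add_missing_parents(expression, missing_parents):
--     # Iterative explicit-stack DFS instead of A's accumulator-mutating recursion.
--     n = len(missing_parents)
--     combos = [list(missing_parents)]
--     stack = [(list(missing_parents), 0)]
--     while stack:
--         lst, i = stack.pop()
--         if i < n:
--             neg = lst.copy()
--             neg[i] = '~' + neg[i]
--             combos.append(neg)
--             stack.append((lst, i + 1))   # exclude branch, processed later
--             stack.append((neg, i + 1))   # negate branch, processed first (DFS order)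
--     return [list(expression) + term for term in combos]
-- ===== Notes on version B (the rewrite author's own statement) =====
-- stated objective: alternative
-- what changed: A's accumulator-mutating recursion (append negated copy, recurse negate-branch then exclude-branch) is replaced by an explicit iterative worklist/stack of (partial list, next index) states, pushing the exclude continuation before the negate continuation to reproduce A's DFS pre-order; the final expression-prefixing pass becomes a single comprehension.
import Mathlib
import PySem

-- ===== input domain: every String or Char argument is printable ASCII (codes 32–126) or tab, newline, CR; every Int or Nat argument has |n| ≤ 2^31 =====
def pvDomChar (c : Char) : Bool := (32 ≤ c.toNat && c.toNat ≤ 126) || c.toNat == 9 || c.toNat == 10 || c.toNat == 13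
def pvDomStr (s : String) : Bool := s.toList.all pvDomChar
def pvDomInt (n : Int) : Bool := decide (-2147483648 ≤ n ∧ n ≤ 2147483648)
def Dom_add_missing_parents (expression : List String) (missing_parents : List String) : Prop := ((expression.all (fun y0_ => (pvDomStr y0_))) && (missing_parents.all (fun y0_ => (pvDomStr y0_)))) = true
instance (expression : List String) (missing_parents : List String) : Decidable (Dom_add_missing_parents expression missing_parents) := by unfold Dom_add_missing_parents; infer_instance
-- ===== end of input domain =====

-- B replaces A's accumulator-mutating recursion by an explicit iterative stack (same values, same order); objective: alternative decomposition.

-- ===== PORT A =====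
-- Python's recursion appends to a mutable `combination`; the port returns the list
-- of elements appended. Python tests `index == len` (and would raise IndexError for
-- index > len, unreachable from the entry where index starts at 0), so the port
-- guards with `i < length`; the Nat fuel only makes the recursion structural —
-- `length - index` fuel is enough since each call increments the index and the
-- length is preserved by `set`.
def get_all_combinations_A_aux : Nat → List String → Nat → List (List String)
  | 0, _, _ => []
  | fuel + 1, missing_parents, index =>
    if index < missing_parents.length then
      let temp := missing_parents.set index ("~" ++ missing_parents.getD index "")
      temp :: (get_all_combinations_A_aux fuel temp (index + 1)
               ++ get_all_combinations_A_aux fuel missing_parents (index + 1))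
    else []

def get_all_combinations_A (missing_parents : List String) (index : Nat) : List (List String) :=
  get_all_combinations_A_aux (missing_parents.length - index) missing_parents index

def add_missing_parents (expression : List String) (missing_parents : List String) : List (List String) :=
  (missing_parents :: get_all_combinations_A missing_parents 0).map (fun term => expression ++ term)

-- ===== PORT B =====
-- stack of (partial list, next index); pop, negate index i (recording the snapshot),
-- push the exclude continuation below the negate continuation so the negated branch
-- runs first. The Nat fuel only bounds the number of iterations (each pop strictly
-- decreases the potential Σ 3^(n+1-i), which starts at 3^(n+1)).
def stack_loop_B : Nat → Nat → List (List String × Nat) → List (List String)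
  | 0, _, _ => []
  | fuel + 1, n, stack =>
    match stack with
    | [] => []
    | (lst, i) :: rest =>
      if i < n then
        let neg := lst.set i ("~" ++ lst.getD i "")
        neg :: stack_loop_B fuel n ((neg, i + 1) :: (lst, i + 1) :: rest)
      else stack_loop_B fuel n rest

def add_missing_parents_alt (expression : List String) (missing_parents : List String) : List (List String) :=
  let n := missing_parents.length
  let combos := missing_parents :: stack_loop_B (3 ^ (n + 1)) n [(missing_parents, 0)]
  combos.map (fun term => expression ++ term)

-- ===== PRECONDITION & SPEC =====
def Spec_add_missing_parents (expression : List String) (missing_parents : List String) (out : List (List String)) : Prop := out = add_missing_parents_alt expression missing_parents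
instance (expression : List String) (missing_parents : List String) (out : List (List String)) : Decidable (Spec_add_missing_parents expression missing_parents out) := by unfold Spec_add_missing_parents; infer_instance

-- ===== CLAIM (what is proved, stated in full; the proofs are below) =====
def Claim_equal_add_missing_parents : Prop := ∀ (expression : List String) (missing_parents : List String), Dom_add_missing_parents expression missing_parents → Spec_add_missing_parents expression missing_parents (add_missing_parents expression missing_parents)

-- ===== LEMMAS AND PROOFS =====

-- potential of a stack (proof-only): Σ 3^(n+1-i) over its frames
def pvMeasureB (n : Nat) (stack : List (List String × Nat)) : Nat :=
  (stack.map (fun p => 3 ^ (n + 1 - p.2))).sum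

-- A's recursion: any sufficient fuel computes the same list
theorem gac_fuel (f1 : Nat) : ∀ (f2 : Nat) (mp : List String) (i : Nat),
    mp.length - i ≤ f1 → mp.length - i ≤ f2 →
    get_all_combinations_A_aux f1 mp i = get_all_combinations_A_aux f2 mp i := by
  induction f1 with
  | zero =>
    intro f2 mp i h1 h2
    have hni : ¬ i < mp.length := by omega
    cases f2 with
    | zero => rfl
    | succ f2 => simp [get_all_combinations_A_aux, hni]
  | succ f1 ih =>
    intro f2 mp i h1 h2
    by_cases hi : i < mp.length
    · cases f2 with
      | zero => omega
      | succ f2 =>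
        simp only [get_all_combinations_A_aux, hi, if_pos]
        have hset : (mp.set i ("~" ++ mp.getD i "")).length = mp.length := List.length_set ..
        rw [ih f2 _ (i + 1) (by rw [hset]; omega) (by rw [hset]; omega),
            ih f2 mp (i + 1) (by omega) (by omega)]
    · cases f2 with
      | zero => simp [get_all_combinations_A_aux, hi]
      | succ f2 => simp [get_all_combinations_A_aux, hi]

-- the potential of the stack pushed in the step branch strictly decreases
theorem pvMeasureB_step (n i : Nat) (lst neg : List String)
    (rest : List (List String × Nat)) (hin : i < n) :
    pvMeasureB n ((neg, i + 1) :: (lst, i + 1) :: rest) < pvMeasureB n ((lst, i) :: rest) := by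
  simp only [pvMeasureB, List.map_cons, List.sum_cons]
  have h3 : 3 ^ (n + 1 - i) = 3 ^ (n - i) * 3 := by
    have : n + 1 - i = (n - i) + 1 := by omega
    rw [this, pow_succ]
  have hp : 0 < 3 ^ (n - i) := pow_pos (by norm_num) _
  have hni : n + 1 - (i + 1) = n - i := by omega
  rw [hni, h3]; omega

-- B's loop: any sufficient fuel computes the same list
theorem loop_fuel (f1 : Nat) : ∀ (f2 n : Nat) (stack : List (List String × Nat)),
    pvMeasureB n stack ≤ f1 → pvMeasureB n stack ≤ f2 →
    stack_loop_B f1 n stack = stack_loop_B f2 n stack := by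
  induction f1 with
  | zero =>
    intro f2 n stack h1 h2
    match stack with
    | [] => cases f2 <;> rfl
    | (lst, i) :: rest =>
      exfalso
      have hp : 0 < 3 ^ (n + 1 - i) := pow_pos (by norm_num) _
      simp only [pvMeasureB, List.map_cons, List.sum_cons] at h1
      omega
  | succ f1 ih =>
    intro f2 n stack h1 h2
    match stack with
    | [] => cases f2 <;> rfl
    | (lst, i) :: rest =>
      have hp : 0 < 3 ^ (n + 1 - i) := pow_pos (by norm_num) _
      have hm : pvMeasureB n ((lst, i) :: rest) = 3 ^ (n + 1 - i) + pvMeasureB n rest := by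
        simp [pvMeasureB]
      cases f2 with
      | zero => exfalso; omega
      | succ f2 =>
        by_cases hin : i < n
        · simp only [stack_loop_B, hin, if_pos]
          have hd := pvMeasureB_step n i lst (lst.set i ("~" ++ lst.getD i "")) rest hin
          rw [ih f2 n _ (by omega) (by omega)]
        · simp only [stack_loop_B, hin, if_neg, not_false_iff]
          exact ih f2 n rest (by omega) (by omega)

-- popping one frame of B's stack yields exactly A's recursion output for that frame,
-- followed by the processing of the rest of the stack
theorem loop_cons (n : Nat) : ∀ (k i : Nat) (lst : List String)
    (rest : List (List String × Nat)),
    n - i = k → lst.length = n →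
    stack_loop_B (pvMeasureB n ((lst, i) :: rest)) n ((lst, i) :: rest)
      = get_all_combinations_A lst i ++ stack_loop_B (pvMeasureB n rest) n rest := by
  intro k
  induction k with
  | zero =>
    intro i lst rest hk hl
    have hni : ¬ i < n := by omega
    have hp : 0 < 3 ^ (n + 1 - i) := pow_pos (by norm_num) _
    have hm : pvMeasureB n ((lst, i) :: rest) = 3 ^ (n + 1 - i) + pvMeasureB n rest := by
      simp [pvMeasureB]
    obtain ⟨m, hmeq⟩ : ∃ m, pvMeasureB n ((lst, i) :: rest) = m + 1 :=
      ⟨pvMeasureB n ((lst, i) :: rest) - 1, by omega⟩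
    rw [hmeq]
    simp only [stack_loop_B, hni, if_neg, not_false_iff]
    rw [loop_fuel m (pvMeasureB n rest) n rest (by omega) (by omega)]
    have hA : get_all_combinations_A lst i = [] := by
      unfold get_all_combinations_A
      have h0 : lst.length - i = 0 := by omega
      rw [h0]
      rfl
    rw [hA, List.nil_append]
  | succ k ih =>
    intro i lst rest hk hl
    have hin : i < n := by omega
    have hil : i < lst.length := by omega
    have hp : 0 < 3 ^ (n + 1 - i) := pow_pos (by norm_num) _
    have hm : pvMeasureB n ((lst, i) :: rest) = 3 ^ (n + 1 - i) + pvMeasureB n rest := by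
      simp [pvMeasureB]
    obtain ⟨m, hmeq⟩ : ∃ m, pvMeasureB n ((lst, i) :: rest) = m + 1 :=
      ⟨pvMeasureB n ((lst, i) :: rest) - 1, by omega⟩
    rw [hmeq]
    simp only [stack_loop_B, hin, if_pos]
    have hd := pvMeasureB_step n i lst (lst.set i ("~" ++ lst.getD i "")) rest hin
    set neg := lst.set i ("~" ++ lst.getD i "") with hneg
    have hlneg : neg.length = n := by simp [hneg, hl]
    rw [loop_fuel m (pvMeasureB n ((neg, i + 1) :: (lst, i + 1) :: rest)) n
        ((neg, i + 1) :: (lst, i + 1) :: rest) (by omega) (le_refl _)]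
    rw [ih (i + 1) neg ((lst, i + 1) :: rest) (by omega) hlneg]
    rw [ih (i + 1) lst rest (by omega) hl]
    -- unfold A's side one step
    have hAl : get_all_combinations_A lst i
        = neg :: (get_all_combinations_A neg (i + 1) ++ get_all_combinations_A lst (i + 1)) := by
      unfold get_all_combinations_A
      have h1 : lst.length - i = k + 1 := by omega
      rw [h1]
      simp only [get_all_combinations_A_aux, hil, if_pos, ← hneg]
      rw [gac_fuel k (neg.length - (i + 1)) neg (i + 1) (by omega) (le_refl _),
          gac_fuel k (lst.length - (i + 1)) lst (i + 1) (by omega) (le_refl _)]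
    rw [hAl]
    simp

-- ===== VERDICT (by name: the statement is the Claim_ definition above) =====
theorem add_missing_parents_spec : Claim_equal_add_missing_parents := by
  intro expression missing_parents _
  unfold Spec_add_missing_parents add_missing_parents
  have halt : add_missing_parents_alt expression missing_parents
      = (missing_parents :: stack_loop_B (3 ^ (missing_parents.length + 1))
          missing_parents.length [(missing_parents, 0)]).map (fun term => expression ++ term) := rfl
  rw [halt]
  have h0 : pvMeasureB missing_parents.length [(missing_parents, 0)]
      = 3 ^ (missing_parents.length + 1) := by simp [pvMeasureB]
  rw [loop_fuel (3 ^ (missing_parents.length + 1))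
      (pvMeasureB missing_parents.length [(missing_parents, 0)]) missing_parents.length
      [(missing_parents, 0)] (by omega) (le_refl _)]
  rw [loop_cons missing_parents.length (missing_parents.length - 0) 0 missing_parents [] rfl rfl]
  have hnil : stack_loop_B (pvMeasureB missing_parents.length []) missing_parents.length [] = [] := by
    have : pvMeasureB missing_parents.length [] = 0 := by simp [pvMeasureB]
    rw [this]
    rfl
  rw [hnil]
  simp
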